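-- pv_equiv track=rewrite | github.com/hjyoon99/Algorithm | 프로그래머스/1/42862. 체육복/체육복.py | solution
-- ===== SOURCE A (Python) =====
-- def solution(n, lost, reserve):
--     lost = set(lost)
--     reserve = set(reserve)
--
--     # 1️⃣ 여벌도 있고 도난도 당한 학생 제거
--     common = lost & reserve
--     lost -= common
--     reserve -= common
--
--     # 2️⃣ 체육복 빌려주기
--     for r in sorted(reserve):
--         if r - 1 in lost:
--             lost.remove(r - 1)
--         elif r + 1 in lost:
--             lost.remove(r + 1)
--
--     # 3️⃣ 수업 가능한 학생 수
--     return n - len(lost)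
-- ===== SOURCE B (Python) =====
-- def solution(n, lost, reserve):
--     # two-pointer merge over the two sorted disjoint sets instead of probing a set per reserve
--     L = sorted(set(lost) - set(reserve))
--     R = sorted(set(reserve) - set(lost))
--     i = j = matched = 0
--     while i < len(L) and j < len(R):
--         if R[j] < L[i] - 1:
--             j += 1
--         elif L[i] < R[j] - 1:
--             i += 1
--         else:
--             matched += 1
--             i += 1
--             j += 1
--     return n - (len(L) - matched)
-- ===== Notes on version B (the rewrite author's own statement) =====
-- stated objective: alternative
-- what changed: A greedily probes a mutable lost-set with r-1/r+1 membership tests for each sorted reserve; B sorts both deduped disjoint sets once and counts matches with a single two-pointer merge, never mutating a set.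
import Mathlib
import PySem

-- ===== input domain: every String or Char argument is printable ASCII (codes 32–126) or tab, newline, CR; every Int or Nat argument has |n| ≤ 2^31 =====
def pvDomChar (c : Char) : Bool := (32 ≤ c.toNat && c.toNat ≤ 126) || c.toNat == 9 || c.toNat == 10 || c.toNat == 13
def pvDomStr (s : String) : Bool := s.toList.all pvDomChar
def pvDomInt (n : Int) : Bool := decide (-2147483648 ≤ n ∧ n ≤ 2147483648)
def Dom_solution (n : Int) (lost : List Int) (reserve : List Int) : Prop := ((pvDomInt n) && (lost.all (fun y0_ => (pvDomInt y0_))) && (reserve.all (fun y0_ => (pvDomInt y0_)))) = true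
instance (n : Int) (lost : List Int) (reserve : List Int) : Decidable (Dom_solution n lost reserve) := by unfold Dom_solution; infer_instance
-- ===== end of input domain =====

-- B replaces A's per-reserve set probing with a two-pointer merge of the two sorted disjoint sets (alternative algorithm, same result).

-- ===== PORT A =====
-- loop body of 'for r in sorted(reserve)'; the .getD is never hit: each remove is guarded by the membership test (Python's set.remove raises only when absent)
def solStep (lostS : PySem.Set Int) (r : Int) : PySem.Set Int :=
  if PySem.Set.contains lostS (r - 1) then (PySem.Set.remove? lostS (r - 1)).getD lostS
  else if PySem.Set.contains lostS (r + 1) then (PySem.Set.remove? lostS (r + 1)).getD lostS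
  else lostS

def solution (n : Int) (lost : List Int) (reserve : List Int) : Int :=
  let lostS := PySem.Set.ofList lost
  let reserveS := PySem.Set.ofList reserve
  let common := PySem.Set.inter lostS reserveS
  let lostS2 := PySem.Set.diff lostS common
  let reserveS2 := PySem.Set.diff reserveS common
  let final := (PySem.List.sorted reserveS2 (fun x => x) false).foldl solStep lostS2
  n - PySem.Set.len final

-- ===== PORT B =====
-- the 'while i < len(L) and j < len(R)' two-pointer loop, as recursion consuming the heads
def twoPtr : List Int → List Int → Int
  | [], _ => 0
  | _ :: _, [] => 0
  | l :: L, r :: R =>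
    if r < l - 1 then twoPtr (l :: L) R
    else if l < r - 1 then twoPtr L (r :: R)
    else 1 + twoPtr L R
termination_by L R => L.length + R.length

def solution_alt (n : Int) (lost : List Int) (reserve : List Int) : Int :=
  let L := PySem.List.sorted (PySem.Set.diff (PySem.Set.ofList lost) (PySem.Set.ofList reserve)) (fun x => x) false
  let R := PySem.List.sorted (PySem.Set.diff (PySem.Set.ofList reserve) (PySem.Set.ofList lost)) (fun x => x) false
  n - ((L.length : Int) - twoPtr L R)

-- ===== PRECONDITION & SPEC =====
def Spec_solution (n : Int) (lost : List Int) (reserve : List Int) (out : Int) : Prop := out = solution_alt n lost reserve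
instance (n : Int) (lost : List Int) (reserve : List Int) (out : Int) : Decidable (Spec_solution n lost reserve out) := by unfold Spec_solution; infer_instance

-- ===== CLAIM (what is proved, stated in full; the proofs are below) =====
def Claim_equal_solution : Prop := ∀ (n : Int) (lost : List Int) (reserve : List Int), Dom_solution n lost reserve → Spec_solution n lost reserve (solution n lost reserve)

-- ===== LEMMAS AND PROOFS =====

lemma solStep_eq (s : List Int) (r : Int) :
    solStep s r = if (r - 1) ∈ s then PySem.Set.discard s (r - 1) else if (r + 1) ∈ s then PySem.Set.discard s (r + 1) else s := by
  by_cases h1 : (r - 1) ∈ s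
  · simp [solStep, PySem.Set.remove?_of_mem h1, h1]
  · have c1 : PySem.Set.contains s (r - 1) = false := by
      simpa using fun h => h1 ((PySem.Set.contains_iff s (r - 1)).mp h)
    by_cases h2 : (r + 1) ∈ s
    · simp [solStep, PySem.Set.remove?_of_mem h2, h1, h2]
    · have c2 : PySem.Set.contains s (r + 1) = false := by
        simpa using fun h => h2 ((PySem.Set.contains_iff s (r + 1)).mp h)
      simp [solStep, h1, h2]

lemma foldl_solStep_nil (R : List Int) : R.foldl solStep [] = [] := by
  induction R with
  | nil => rfl
  | cons r R ih => simpa [solStep_eq] using ih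

lemma solStep_perm {s s' : List Int} (r : Int) (h : s.Perm s') : (solStep s r).Perm (solStep s' r) := by
  rw [solStep_eq, solStep_eq]
  by_cases h1 : (r - 1) ∈ s
  · simp [h1, h.mem_iff.mp h1, PySem.Set.discard]
    exact h.filter _
  · have h1' : (r - 1) ∉ s' := fun hx => h1 (h.mem_iff.mpr hx)
    by_cases h2 : (r + 1) ∈ s
    · simp [h1, h1', h2, h.mem_iff.mp h2, PySem.Set.discard]
      exact h.filter _
    · have h2' : (r + 1) ∉ s' := fun hx => h2 (h.mem_iff.mpr hx)
      simpa [h1, h1', h2, h2'] using h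

lemma foldl_solStep_perm (R : List Int) : ∀ {s s' : List Int}, s.Perm s' → (R.foldl solStep s).Perm (R.foldl solStep s') := by
  induction R with
  | nil => intro s s' h; simpa using h
  | cons r R ih => intro s s' h; simpa using ih (solStep_perm r h)

lemma foldl_solStep_skip (l : Int) (R : List Int) :
    ∀ L' : List Int, (∀ r ∈ R, r - 1 ≠ l ∧ r + 1 ≠ l) → R.foldl solStep (l :: L') = l :: R.foldl solStep L' := by
  induction R with
  | nil => intro L' _; rfl
  | cons r R ih =>
    intro L' hq
    obtain ⟨hm1, hp1⟩ := hq r (by simp)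
    have step : solStep (l :: L') r = l :: solStep L' r := by
      rw [solStep_eq, solStep_eq]
      by_cases h1 : (r - 1) ∈ L'
      · simp [h1, List.mem_cons, PySem.Set.discard, Ne.symm hm1]
      · have h1' : (r - 1) ∉ l :: L' := by simp [List.mem_cons, hm1, h1]
        by_cases h2 : (r + 1) ∈ L'
        · simp [h1, h1', h2, List.mem_cons, PySem.Set.discard, Ne.symm hp1]
        · have h2' : (r + 1) ∉ l :: L' := by simp [List.mem_cons, hp1, h2]
          simp [h1, h1', h2, h2']
    simp only [List.foldl_cons, step]
    exact ih (solStep L' r) (fun x hx => hq x (by simp [hx]))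

lemma discard_cons_head_of_not_mem {l : Int} {L' : List Int} (h : l ∉ L') :
    PySem.Set.discard (l :: L') l = L' := by
  have hf : List.filter (fun y => !(y == l)) L' = L' :=
    List.filter_eq_self.mpr (fun a ha => by
      have hne : a ≠ l := fun e => h (e ▸ ha)
      simp [hne])
  simp [PySem.Set.discard, hf]

lemma main_aux : ∀ (k : Nat) (L R : List Int), L.length + R.length = k →
    L.Pairwise (· < ·) → R.Pairwise (· < ·) → (∀ x ∈ L, x ∉ R) →
    ((R.foldl solStep L).length : Int) + twoPtr L R = (L.length : Int) := by
  intro k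
  induction k using Nat.strong_induction_on with
  | _ k ih =>
  intro L R hk hL hR hd
  match L, R with
  | L, [] =>
    cases L <;> simp [twoPtr]
  | [], r :: R' =>
    have h0 : solStep [] r = [] := by simp [solStep_eq]
    simp [twoPtr, h0, foldl_solStep_nil]
  | l :: L', r :: R' =>
    have hk' : L'.length + R'.length + 2 = k := by simpa [Nat.add_assoc, Nat.add_comm, Nat.add_left_comm] using hk
    have hLmin : ∀ x ∈ (l :: L'), l ≤ x := by
      intro x hx
      rcases List.mem_cons.mp hx with h | h
      · exact le_of_eq h.symm
      · exact le_of_lt ((List.pairwise_cons.mp hL).1 x h)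
    have hRmin : ∀ x ∈ (r :: R'), r ≤ x := by
      intro x hx
      rcases List.mem_cons.mp hx with h | h
      · exact le_of_eq h.symm
      · exact le_of_lt ((List.pairwise_cons.mp hR).1 x h)
    by_cases hr : r < l - 1
    · -- reserve r matches nothing: both sides drop r
      have step : solStep (l :: L') r = l :: L' := by
        rw [solStep_eq]
        have h1 : (r - 1) ∉ l :: L' := fun hx => by have := hLmin _ hx; omega
        have h2 : (r + 1) ∉ l :: L' := fun hx => by have := hLmin _ hx; omega
        simp [h1, h2]
      have ihr := ih (L'.length + 1 + R'.length) (by omega) (l :: L') R' (by simp)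
        hL (List.Pairwise.of_cons hR) (fun x hx => fun hc => hd x hx (by simp [hc]))
      simp only [List.foldl_cons, step, twoPtr, if_pos hr]
      simpa using ihr
    · by_cases hl : l < r - 1
      · -- lost l can never be matched: both sides keep l
        have hrl : l + 1 < r := by omega
        have skip : (r :: R').foldl solStep (l :: L') = l :: (r :: R').foldl solStep L' := by
          apply foldl_solStep_skip
          intro x hx
          have := hRmin x hx
          constructor <;> omega
        have ihr := ih (L'.length + (R'.length + 1)) (by omega) L' (r :: R') (by simp)
          (List.Pairwise.of_cons hL) hR (fun x hx => hd x (by simp [hx]))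
        rw [skip]
        simp only [twoPtr, if_neg hr, if_pos hl, List.length_cons]
        push_cast
        push_cast at ihr
        omega
      · -- |l - r| = 1: match
        have hlr : l ≠ r := fun e => hd l (by simp) (by simp [e])
        have hlnL : l ∉ L' := (List.pairwise_cons.mp hL).1 l |> fun h => fun hx => lt_irrefl l (h hx)
        have step : solStep (l :: L') r = L' := by
          rw [solStep_eq]
          by_cases hc : r = l + 1
          · have : (r - 1) ∈ l :: L' := by simp [hc]
            rw [if_pos this]
            have : r - 1 = l := by omega
            rw [this, discard_cons_head_of_not_mem hlnL]
          · have hc2 : r = l - 1 := by omega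
            have h1 : (r - 1) ∉ l :: L' := fun hx => by have := hLmin _ hx; omega
            have h2 : (r + 1) ∈ l :: L' := by
              have he : r + 1 = l := by omega
              simp [he]
            rw [if_neg h1, if_pos h2]
            have : r + 1 = l := by omega
            rw [this, discard_cons_head_of_not_mem hlnL]
        have ihr := ih (L'.length + R'.length) (by omega) L' R' rfl
          (List.Pairwise.of_cons hL) (List.Pairwise.of_cons hR)
          (fun x hx => fun hc => hd x (by simp [hx]) (by simp [hc]))
        simp only [List.foldl_cons, step, twoPtr, if_neg hr, if_neg hl, List.length_cons]
        push_cast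
        push_cast at ihr
        omega

-- ===== VERDICT (by name: the statement is the Claim_ definition above) =====
theorem solution_spec : Claim_equal_solution := by
  intro n lost reserve _
  unfold Spec_solution solution solution_alt
  simp only [PySem.Set.len]
  set ls := PySem.Set.ofList lost with hls
  set rs := PySem.Set.ofList reserve with hrs
  have hnls : ls.Nodup := PySem.Set.nodup_ofList lost
  have hnrs : rs.Nodup := PySem.Set.nodup_ofList reserve
  have hD1 : (PySem.Set.diff ls (PySem.Set.inter ls rs)).Perm (PySem.Set.diff ls rs) := by
    rw [List.perm_ext_iff_of_nodup (PySem.Set.nodup_diff _ _ hnls) (PySem.Set.nodup_diff _ _ hnls)]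
    intro a
    simp only [PySem.Set.mem_diff, PySem.Set.mem_inter]
    tauto
  have hD2 : (PySem.Set.diff rs (PySem.Set.inter ls rs)).Perm (PySem.Set.diff rs ls) := by
    rw [List.perm_ext_iff_of_nodup (PySem.Set.nodup_diff _ _ hnrs) (PySem.Set.nodup_diff _ _ hnrs)]
    intro a
    simp only [PySem.Set.mem_diff, PySem.Set.mem_inter]
    tauto
  set L := PySem.List.sorted (PySem.Set.diff ls rs) (fun x => x) false with hLdef
  set R := PySem.List.sorted (PySem.Set.diff rs ls) (fun x => x) false with hRdef
  have hsorted2 : PySem.List.sorted (PySem.Set.diff rs (PySem.Set.inter ls rs)) (fun x => x) false = R :=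
    PySem.List.sorted_eq_sorted_of_perm _ _ _ (fun _ _ h => h) hD2
  have hLp : (PySem.Set.diff ls (PySem.Set.inter ls rs)).Perm L :=
    hD1.trans (PySem.List.sorted_perm (PySem.Set.diff ls rs) (fun x => x) false).symm
  have hfold : (R.foldl solStep (PySem.Set.diff ls (PySem.Set.inter ls rs))).Perm (R.foldl solStep L) :=
    foldl_solStep_perm R hLp
  have hLlt : L.Pairwise (· < ·) := by
    have hnd : (PySem.Set.diff ls rs).Nodup := PySem.Set.nodup_diff _ _ hnls
    have h := PySem.List.sorted_ofList_pairwise_lt (PySem.Set.diff ls rs)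
    rwa [PySem.Set.ofList_eq_self_of_nodup _ hnd] at h
  have hRlt : R.Pairwise (· < ·) := by
    have hnd : (PySem.Set.diff rs ls).Nodup := PySem.Set.nodup_diff _ _ hnrs
    have h := PySem.List.sorted_ofList_pairwise_lt (PySem.Set.diff rs ls)
    rwa [PySem.Set.ofList_eq_self_of_nodup _ hnd] at h
  have hdisj : ∀ x ∈ L, x ∉ R := by
    intro x hx hxR
    have hx' := (PySem.Set.mem_diff ls rs x).mp ((PySem.List.mem_sorted _ _ _ x).mp hx)
    have hxR' := (PySem.Set.mem_diff rs ls x).mp ((PySem.List.mem_sorted _ _ _ x).mp hxR)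
    exact hx'.2 hxR'.1
  have hmain := main_aux (L.length + R.length) L R rfl hLlt hRlt hdisj
  have hlen : (R.foldl solStep (PySem.Set.diff ls (PySem.Set.inter ls rs))).length = (R.foldl solStep L).length :=
    hfold.length_eq
  rw [hsorted2, hlen]
  omega
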